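-- pv_equiv track=rewrite | github.com/ValentinCabrera/codificador | logic/codes.py | ami
-- ===== SOURCE A (Python) =====
-- def invertir(sim):
--     if sim == '+':
--         return '-'
--
--     elif sim == '-':
--         return '+'
--
-- def ami(sec, last_sign='+'):
--     """
--     Codifica una secuencia electrica a binaria en AMI
--
--     Parametros: Secuencia binaria
--
--     Retornos: Pulsos electrica
--     """
--
--     NAME = "AMI"
--
--     code = []
--
--     for i in sec:
--         if i == '0':
--             code.append('0')
--
--         elif i == '1':
--             last_sign = invertir(last_sign)
--             code.append(last_sign)
--
--         else:
--             raise(ValueError("Secuencia invalida"))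
--
--     return code, NAME
-- ===== SOURCE B (Python) =====
-- _INV = {'+': '-', '-': '+'}
--
-- def ami(sec, last_sign='+'):
--     """AMI encoder: validate first, then prefix-count ones and map by parity."""
--     if any(c not in ('0', '1') for c in sec):
--         raise ValueError("Secuencia invalida")
--     prefix = []
--     ones = 0
--     for c in sec:
--         if c == '1':
--             ones += 1
--         prefix.append(ones)
--     code = ['0' if c == '0'
--             else (_INV[last_sign] if k % 2 == 1 else last_sign)
--             for c, k in zip(sec, prefix)]
--     return code, "AMI"
-- ===== Notes on version B (the rewrite author's own statement) =====
-- stated objective: alternative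
-- what changed: B validates the whole sequence first, then builds a prefix count of ones and produces each pulse from the parity of that count in a separate map pass, instead of A's single stateful loop toggling last_sign as it goes.
-- outside the precondition, e.g. on ami('1', 'x'): A returns ([None], 'AMI'), B raises KeyError
import Mathlib
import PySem

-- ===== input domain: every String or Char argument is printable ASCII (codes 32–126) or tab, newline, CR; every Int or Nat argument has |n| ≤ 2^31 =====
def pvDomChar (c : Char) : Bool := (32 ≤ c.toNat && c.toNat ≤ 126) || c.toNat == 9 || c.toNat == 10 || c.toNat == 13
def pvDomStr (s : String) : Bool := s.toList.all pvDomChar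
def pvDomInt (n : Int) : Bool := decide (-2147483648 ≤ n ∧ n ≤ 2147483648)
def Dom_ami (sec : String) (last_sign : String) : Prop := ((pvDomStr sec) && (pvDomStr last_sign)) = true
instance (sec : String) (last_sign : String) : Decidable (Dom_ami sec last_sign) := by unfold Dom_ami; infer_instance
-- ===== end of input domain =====

-- B is an alternative decomposition: validate first, prefix-count the ones, then map by parity
-- (equivalence of return values on Pre_; A raises / returns None-lists outside Pre_).


-- ===== PORT A =====
-- Python's invertir: returns None for any other sim; that case is excluded by Pre_ami ("" placeholder)
def invertir (sim : String) : String :=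
  if sim = "+" then "-" else if sim = "-" then "+" else ""

-- the body of A's for-loop (state: code so far, current last_sign)
def amiStep (acc : List String × String) (i : Char) : List String × String :=
  if i = '0' then (acc.1 ++ ["0"], acc.2)
  else if i = '1' then
    let ls := invertir acc.2
    (acc.1 ++ [ls], ls)
  else acc  -- Python raises ValueError here; excluded by Pre_ami

def ami (sec : String) (last_sign : String) : List String × String :=
  let st := sec.toList.foldl amiStep ([], last_sign)
  (st.1, "AMI")

-- ===== PORT B =====
-- _INV[sim]; KeyError on any other key is excluded by Pre_ami ("" placeholder)
def invGet (sim : String) : String :=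
  if sim = "+" then "-" else if sim = "-" then "+" else ""

-- body of B's prefix-count loop (state: prefix list so far, ones so far)
def preStep (acc : List Nat × Nat) (c : Char) : List Nat × Nat :=
  let ones := if c = '1' then acc.2 + 1 else acc.2
  (acc.1 ++ [ones], ones)

-- B's comprehension body
def pulse (last_sign : String) (p : Char × Nat) : String :=
  if p.1 = '0' then "0"
  else if p.2 % 2 = 1 then invGet last_sign else last_sign

def ami_alt (sec : String) (last_sign : String) : List String × String :=
  let cs := sec.toList
  let pre := (cs.foldl preStep ([], 0)).1
  let code := (cs.zip pre).map (pulse last_sign)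
  (code, "AMI")

-- ===== PRECONDITION & SPEC =====
-- Pre_ excludes inputs where A raises ValueError (a char other than '0'/'1'), and inputs where
-- sec contains '1' but last_sign is not '+'/'-': there A's invertir returns None, so A returns a
-- list containing None (not a string value); B raises KeyError there.
def Pre_ami (sec : String) (last_sign : String) : Prop :=
  (sec.toList.all (fun c => c == '0' || c == '1')) = true ∧
  ('1' ∈ sec.toList → last_sign = "+" ∨ last_sign = "-")
instance (sec : String) (last_sign : String) : Decidable (Pre_ami sec last_sign) := by
  unfold Pre_ami; infer_instance

def pvWitness_ami : String × String := ("1", "+")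

def Spec_ami (sec : String) (last_sign : String) (out : List String × String) : Prop := out = ami_alt sec last_sign
instance (sec : String) (last_sign : String) (out : List String × String) : Decidable (Spec_ami sec last_sign out) := by unfold Spec_ami; infer_instance

-- ===== CLAIM (what is proved, stated in full; the proofs are below) =====
def Claim_equal_ami : Prop := ∀ (sec : String) (last_sign : String), Dom_ami sec last_sign → Pre_ami sec last_sign → Spec_ami sec last_sign (ami sec last_sign)

-- ===== LEMMAS AND PROOFS =====

-- reference code sequence produced by A's loop
def specCode : List Char → String → List String
  | [], _ => []
  | c :: t, ls =>
    if c = '0' then "0" :: specCode t ls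
    else if c = '1' then invertir ls :: specCode t (invertir ls)
    else specCode t ls

-- final last_sign of A's loop
def specSign : List Char → String → String
  | [], ls => ls
  | c :: t, ls => if c = '1' then specSign t (invertir ls) else specSign t ls

lemma A_fold (cs : List Char) : ∀ (code : List String) (ls : String),
    cs.foldl amiStep (code, ls) = (code ++ specCode cs ls, specSign cs ls) := by
  induction cs with
  | nil => intro code ls; simp [specCode, specSign]
  | cons c t ih =>
    intro code ls
    by_cases h0 : c = '0'
    · simp [amiStep, h0, specCode, specSign, ih]
    · by_cases h1 : c = '1'
      · simp [amiStep, h1, specCode, specSign, ih]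
      · simp [amiStep, h0, h1, specCode, specSign, ih]

-- prefix counts produced by B's first loop, starting at offset n
def prefixList : List Char → Nat → List Nat
  | [], _ => []
  | c :: t, n =>
    let n' := if c = '1' then n + 1 else n
    n' :: prefixList t n'

def finalOnes : List Char → Nat → Nat
  | [], n => n
  | c :: t, n => finalOnes t (if c = '1' then n + 1 else n)

lemma B_fold (cs : List Char) : ∀ (acc : List Nat) (n : Nat),
    cs.foldl preStep (acc, n) = (acc ++ prefixList cs n, finalOnes cs n) := by
  induction cs with
  | nil => intro acc n; simp [prefixList, finalOnes]
  | cons c t ih =>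
    intro acc n
    by_cases h1 : c = '1' <;> simp [preStep, h1, prefixList, finalOnes, ih]

lemma invertir_invertir (s : String) (hs : s = "+" ∨ s = "-") :
    invertir (invertir s) = s := by rcases hs with h | h <;> simp [h, invertir]

lemma zip_map (s : String) (hs : s = "+" ∨ s = "-") :
    ∀ (cs : List Char) (n : Nat), (∀ c ∈ cs, c = '0' ∨ c = '1') →
      (cs.zip (prefixList cs n)).map (pulse s)
        = specCode cs (if n % 2 = 0 then s else invertir s) := by
  intro cs
  induction cs with
  | nil => intro n _; simp [prefixList, specCode]
  | cons c t ih =>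
    intro n hv
    rcases hv c (by simp) with h0 | h1
    · have ht : ∀ c ∈ t, c = '0' ∨ c = '1' := fun x hx => hv x (by simp [hx])
      simp [prefixList, h0, pulse, specCode, ih n ht]
    · have ht : ∀ c ∈ t, c = '0' ∨ c = '1' := fun x hx => hv x (by simp [hx])
      have hne : c ≠ '0' := by simp [h1]
      have htail := ih (n + 1) ht
      by_cases hp : n % 2 = 0
      · have hp1 : (n + 1) % 2 = 1 := by omega
        have : invGet s = invertir s := by rcases hs with h | h <;> simp [h, invGet, invertir]
        simp [prefixList, h1, pulse, specCode, hp, hp1, htail, this]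
      · have hp1 : (n + 1) % 2 = 0 := by omega
        have hinv := invertir_invertir s hs
        simp [prefixList, h1, pulse, specCode, hp, hp1, htail, hinv]

lemma no_one (ls : String) : ∀ (cs : List Char) (n : Nat), (∀ c ∈ cs, c = '0') →
    specCode cs ls = (cs.zip (prefixList cs n)).map (pulse ls) := by
  intro cs
  induction cs with
  | nil => intro n _; simp [prefixList, specCode]
  | cons c t ih =>
    intro n hv
    have h0 : c = '0' := hv c (by simp)
    have ht : ∀ c ∈ t, c = '0' := fun x hx => hv x (by simp [hx])
    simp [prefixList, h0, pulse, specCode, ih n ht]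

-- ===== VERDICT (by name: the statement is the Claim_ definition above) =====
theorem ami_spec : Claim_equal_ami := by
  intro sec last_sign _dom hpre
  obtain ⟨hvB, hsig⟩ := hpre
  have hv : ∀ c ∈ sec.toList, c = '0' ∨ c = '1' := by simpa using hvB
  unfold Spec_ami ami ami_alt
  simp only [A_fold, B_fold, List.nil_append, Prod.mk.injEq, and_true]
  by_cases h1 : '1' ∈ sec.toList
  · have hs := hsig h1
    have := zip_map last_sign hs sec.toList 0 hv
    simpa using this.symm
  · have hall : ∀ c ∈ sec.toList, c = '0' := by
      intro c hc
      rcases hv c hc with h | h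
      · exact h
      · exact absurd (h ▸ hc) h1
    exact no_one last_sign sec.toList 0 hall
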